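-- pv_equiv track=rewrite | github.com/PdxCodeGuild/class_opal | code/jim/python/lab08_v4_refactor.py | calculate_start_water
-- ===== SOURCE A (Python) =====
-- def peaks(data: list):
--     peaks_indices = []
--     for i in range(1, len(data)-1):
--         if data[i] > max(data[i - 1], data[i + 1]):
--             peaks_indices.append(i)
--     return peaks_indices
--
-- def calculate_start_water(data: list):
--     peaks_indices = peaks(data)
--     start_water = 0
--     if len(data) > 1:
--         if data[0] > data[1] and len(peaks_indices) > 0:
--             for i in range(0, peaks_indices[0]):
--                 start_water += max(min(data[peaks_indices[0]],
--                                    data[0]) - data[i], 0)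
--         elif data[0] > data[1] and data[-1] > data[-2] and len(peaks_indices) == 0:
--             for i in range(len(data)):
--                 start_water += max(min(data[0], data[-1]) - data[i], 0)
--     return start_water
-- ===== SOURCE B (Python) =====
-- def calculate_start_water(data):
--     if len(data) < 2 or data[0] <= data[1]:
--         return 0
--     d0 = data[0]
--     seen = []          # elements strictly before `prev`
--     it = iter(data)
--     prev = next(it)
--     cur = next(it)
--     for nxt in it:
--         if cur > prev and cur > nxt:            # first interior peak is `cur`
--             h = min(cur, d0)
--             return sum(w for w in (h - v for v in seen + [prev]) if w > 0)
--         seen.append(prev)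
--         prev, cur = cur, nxt
--     if data[-1] > data[-2]:
--         h = min(d0, data[-1])
--         return sum(w for w in (h - v for v in data) if w > 0)
--     return 0
-- ===== Notes on version B (the rewrite author's own statement) =====
-- stated objective: faster
-- what changed: B abandons A's index arithmetic and full peaks-index table: it consumes the list through an iterator with a sliding (prev, cur, nxt) window while pushing passed elements onto a prefix stack, stops at the first peak and folds that stack, and sums only the strictly positive level differences via a filtered generator instead of max(...,0) accumulation over index ranges.
import Mathlib
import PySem

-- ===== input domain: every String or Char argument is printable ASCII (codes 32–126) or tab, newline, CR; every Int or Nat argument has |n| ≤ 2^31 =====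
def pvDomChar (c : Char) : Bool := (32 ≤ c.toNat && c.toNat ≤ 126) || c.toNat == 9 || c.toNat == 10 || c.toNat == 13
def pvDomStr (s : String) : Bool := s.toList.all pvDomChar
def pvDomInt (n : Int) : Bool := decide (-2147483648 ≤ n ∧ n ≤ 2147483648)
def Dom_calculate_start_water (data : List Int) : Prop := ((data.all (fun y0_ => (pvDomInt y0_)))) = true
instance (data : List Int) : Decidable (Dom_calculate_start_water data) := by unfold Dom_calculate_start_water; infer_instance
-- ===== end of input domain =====

-- B replaces A's peaks-index table and index loops by an index-free sliding-window walk with a prefix stack that stops at the first peak, summing only the positive level differences (objective: faster, constant-factor, measured).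


-- ===== PORT A =====
-- helper 'peaks' of A: builds the full list of peak indices
def peaksA (data : List Int) : List Int :=
  (PySem.List.pyRange 1 ((data.length : Int) - 1) 1).foldl
    (fun acc i =>
      if PySem.List.pyGetD data i 0 > max (PySem.List.pyGetD data (i - 1) 0) (PySem.List.pyGetD data (i + 1) 0)
      then acc ++ [i] else acc) []

def calculate_start_water (data : List Int) : Int :=
  let peaks_indices := peaksA data
  let start_water : Int := 0
  if (data.length : Int) > 1 then
    if PySem.List.pyGetD data 0 0 > PySem.List.pyGetD data 1 0 ∧ peaks_indices.length > 0 then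
      (PySem.List.pyRange 0 (PySem.List.pyGetD peaks_indices 0 0) 1).foldl
        (fun s i =>
          s + max (min (PySem.List.pyGetD data (PySem.List.pyGetD peaks_indices 0 0) 0)
                       (PySem.List.pyGetD data 0 0) - PySem.List.pyGetD data i 0) 0)
        start_water
    else if PySem.List.pyGetD data 0 0 > PySem.List.pyGetD data 1 0 ∧
            PySem.List.pyGetD data (-1) 0 > PySem.List.pyGetD data (-2) 0 ∧
            peaks_indices.length = 0 then
      (PySem.List.pyRange 0 (data.length : Int) 1).foldl
        (fun s i =>
          s + max (min (PySem.List.pyGetD data 0 0) (PySem.List.pyGetD data (-1) 0)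
                   - PySem.List.pyGetD data i 0) 0)
        start_water
    else start_water
  else start_water

-- ===== PORT B =====
-- B's walk: consumes the list with a (prev, cur, nxt) window, pushing passed elements
-- onto the prefix stack `seen`; at the first peak it folds the stack and stops.
def walkB (d0 : Int) (seen : List Int) (prev cur : Int) : List Int → Option Int
  | [] => none
  | nxt :: rest =>
      if cur > prev ∧ cur > nxt then
        some ((((seen ++ [prev]).map (fun v => min cur d0 - v)).filter (fun w => w > 0)).sum)
      else
        walkB d0 (seen ++ [prev]) cur nxt rest

def calculate_start_water_alt (data : List Int) : Int :=
  if (data.length : Int) < 2 ∨ PySem.List.pyGetD data 0 0 ≤ PySem.List.pyGetD data 1 0 then 0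
  else
    let d0 := PySem.List.pyGetD data 0 0
    match walkB d0 [] d0 (PySem.List.pyGetD data 1 0) (data.drop 2) with
    | some w => w
    | none =>
        if PySem.List.pyGetD data (-1) 0 > PySem.List.pyGetD data (-2) 0 then
          ((data.map (fun v => min d0 (PySem.List.pyGetD data (-1) 0) - v)).filter (fun w => w > 0)).sum
        else 0

-- ===== PRECONDITION & SPEC =====
def Spec_calculate_start_water (data : List Int) (out : Int) : Prop := out = calculate_start_water_alt data
instance (data : List Int) (out : Int) : Decidable (Spec_calculate_start_water data out) := by unfold Spec_calculate_start_water; infer_instance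

-- ===== CLAIM (what is proved, stated in full; the proofs are below) =====
def Claim_equal_calculate_start_water : Prop := ∀ (data : List Int), Dom_calculate_start_water data → Spec_calculate_start_water data (calculate_start_water data)

-- ===== LEMMAS AND PROOFS =====

-- the peak predicate of both programs, on indices of `data`
def predP (data : List Int) (i : Int) : Bool :=
  decide (PySem.List.pyGetD data i 0 >
    max (PySem.List.pyGetD data (i - 1) 0) (PySem.List.pyGetD data (i + 1) 0))

-- A's peaks helper is the filter of the scanned range by the peak predicate
theorem peaksA_eq_filter (data : List Int) :
    peaksA data = (PySem.List.pyRange 1 ((data.length : Int) - 1) 1).filter (predP data) := by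
  unfold peaksA predP
  rw [PySem.List.foldl_append_ite_eq_filter]
  simp only [List.nil_append]

theorem find?_eq_head?_filter' {α : Type} (p : α → Bool) (l : List α) :
    l.find? p = (l.filter p).head? := by
  induction l with
  | nil => rfl
  | cons x xs ih =>
      cases h : p x with
      | true => simp [h]
      | false =>
          simp only [List.find?_cons, List.filter_cons, h, Bool.false_eq_true, if_false]
          exact ih

-- summing only the positive entries equals summing the 0-clamped entries
theorem sum_filter_pos_eq_sum_max (l : List Int) :
    (l.filter (fun w => w > 0)).sum = (l.map (fun w => max w 0)).sum := by
  induction l with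
  | nil => rfl
  | cons x xs ih =>
      by_cases h : x > 0 <;> simp [h, ih] <;> omega

theorem getD_append_len (l1 : List Int) (x : Int) (l2 : List Int) (d : Int) :
    (l1 ++ x :: l2).getD l1.length d = x := by
  simp [List.getD]

-- indexed comprehension over a prefix range equals mapping over `take`
theorem map_pyGetD_take (data : List Int) (f : Int → Int) (p : ℕ) (hp : p ≤ data.length) :
    (PySem.List.pyRange 0 (p : Int) 1).map (fun i => f (PySem.List.pyGetD data i 0))
      = (data.take p).map f := by
  induction p with
  | zero => simp [PySem.List.pyRange_one_eq_nil]
  | succ q ih =>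
      have hq : q ≤ data.length := Nat.le_of_succ_le hp
      have hlt : q < data.length := hp
      have : ((q : Int) + 1) = ((q + 1 : ℕ) : Int) := by push_cast; ring
      rw [← this, PySem.List.pyRange_one_succ_right (by positivity), List.map_append, ih hq,
        List.take_add_one, List.map_append, List.getElem?_eq_getElem hlt]
      simp [PySem.List.pyGetD_natCast, List.getD, List.getElem?_eq_getElem hlt]

-- B's walk computes, in one pass, what `find?` over the index range computes
theorem walkB_eq_find (data : List Int) (d0 : Int) :
    ∀ (rest seen : List Int) (prev cur : Int),
      seen ++ prev :: cur :: rest = data →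
      walkB d0 seen prev cur rest =
        ((PySem.List.pyRange ((seen.length : Int) + 1) ((data.length : Int) - 1) 1).find?
            (predP data)).map
          (fun p =>
            (((seen ++ prev :: cur :: rest).take p.toNat).map
                (fun v => min (PySem.List.pyGetD data p 0) d0 - v)).filter (fun w => w > 0) |>.sum) := by
  intro rest
  induction rest with
  | nil =>
      intro seen prev cur hdata
      have hlen : data.length = seen.length + 2 := by rw [← hdata]; simp
      have : PySem.List.pyRange ((seen.length : Int) + 1) ((data.length : Int) - 1) 1 = [] := by
        apply PySem.List.pyRange_one_eq_nil; rw [hlen]; push_cast; omega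
      simp [walkB, this]
  | cons nxt rs ih =>
      intro seen prev cur hdata
      have hlen : data.length = seen.length + 3 + rs.length := by rw [← hdata]; simp; omega
      have hm : PySem.List.pyGetD data ((seen.length : Int)) 0 = prev := by
        rw [← hdata, PySem.List.pyGetD_natCast, getD_append_len]
      have hm1 : PySem.List.pyGetD data ((seen.length : Int) + 1) 0 = cur := by
        have h1 : ((seen.length : Int) + 1) = (((seen ++ [prev]).length : ℕ) : Int) := by
          simp
        rw [← hdata, h1, PySem.List.pyGetD_natCast]
        have : seen ++ prev :: cur :: nxt :: rs = (seen ++ [prev]) ++ cur :: nxt :: rs := by simp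
        rw [this, getD_append_len]
      have hm2 : PySem.List.pyGetD data ((seen.length : Int) + 2) 0 = nxt := by
        have h1 : ((seen.length : Int) + 2) = (((seen ++ [prev, cur]).length : ℕ) : Int) := by
          simp
        rw [← hdata, h1, PySem.List.pyGetD_natCast]
        have : seen ++ prev :: cur :: nxt :: rs = (seen ++ [prev, cur]) ++ nxt :: rs := by simp
        rw [this, getD_append_len]
      have hcons : PySem.List.pyRange ((seen.length : Int) + 1) ((data.length : Int) - 1) 1
          = ((seen.length : Int) + 1) ::
            PySem.List.pyRange ((seen.length : Int) + 2) ((data.length : Int) - 1) 1 := by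
        have h0 := PySem.List.pyRange_one_cons (a := (seen.length : Int) + 1)
          (b := (data.length : Int) - 1) (by rw [hlen]; push_cast; omega)
        rw [h0, show ((seen.length : Int) + 1 + 1) = (seen.length : Int) + 2 from by ring]
      have hpred : predP data ((seen.length : Int) + 1)
          = decide (cur > prev ∧ cur > nxt) := by
        unfold predP
        have e1 : (seen.length : Int) + 1 - 1 = (seen.length : Int) := by ring
        have e2 : (seen.length : Int) + 1 + 1 = (seen.length : Int) + 2 := by ring
        rw [e1, e2, hm, hm1, hm2]
        simp [and_comm]
      by_cases hpk : cur > prev ∧ cur > nxt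
      · rw [hcons, List.find?_cons_of_pos (by rw [hpred]; simp [hpk])]
        simp only [walkB, Option.map_some]
        rw [if_pos hpk]
        have htake : (seen ++ prev :: cur :: nxt :: rs).take ((seen.length : Int) + 1).toNat
            = seen ++ [prev] := by
          have : ((seen.length : Int) + 1).toNat = (seen ++ [prev]).length := by
            simp only [List.length_append, List.length_cons, List.length_nil]; omega
          rw [this]
          have h2 : seen ++ prev :: cur :: nxt :: rs = (seen ++ [prev]) ++ cur :: nxt :: rs := by
            simp
          rw [h2, List.take_left]
        rw [htake, hm1]
      · rw [hcons, List.find?_cons_of_neg (by rw [hpred]; simp [hpk])]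
        simp only [walkB]
        rw [if_neg hpk]
        have hdata' : (seen ++ [prev]) ++ cur :: nxt :: rs = data := by
          rw [← hdata]; simp
        have hih := ih (seen ++ [prev]) cur nxt hdata'
        have hlen' : (((seen ++ [prev]).length : ℕ) : Int) + 1 = (seen.length : Int) + 2 := by
          simp only [List.length_append, List.length_cons, List.length_nil]; push_cast; ring
        rw [hih, hlen']
        simp [List.append_assoc]

theorem calculate_start_water_eq (data : List Int) :
    calculate_start_water data = calculate_start_water_alt data := by
  match data with
  | [] => rfl
  | [x] => simp [calculate_start_water, calculate_start_water_alt]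
  | d0 :: d1 :: rest =>
    have hlen : ((d0 :: d1 :: rest).length : Int) = (rest.length : Int) + 2 := by
      simp; omega
    have hg0 : PySem.List.pyGetD (d0 :: d1 :: rest) 0 0 = d0 := by
      simp [PySem.List.pyGetD_zero_cons]
    have hg1 : PySem.List.pyGetD (d0 :: d1 :: rest) 1 0 = d1 := by
      have h1 : (1 : Int) = ((1 : ℕ) : Int) := rfl
      rw [h1, PySem.List.pyGetD_natCast]; rfl
    have hn1 : ((d0 :: d1 :: rest).length : Int) > 1 := by rw [hlen]; omega
    by_cases hd : d0 > d1
    · have hwalk := walkB_eq_find (d0 :: d1 :: rest) d0 rest [] d0 d1 rfl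
      simp only [List.length_nil, Nat.cast_zero, zero_add, List.nil_append] at hwalk
      have hfindhead : (PySem.List.pyRange 1 (((d0 :: d1 :: rest).length : Int) - 1) 1).find?
          (predP (d0 :: d1 :: rest)) = (peaksA (d0 :: d1 :: rest)).head? := by
        rw [peaksA_eq_filter, find?_eq_head?_filter']
      unfold calculate_start_water calculate_start_water_alt
      simp only []
      rw [hg0, hg1, if_pos hn1,
        if_neg (show ¬(((d0 :: d1 :: rest).length : Int) < 2 ∨ d0 ≤ d1) by rw [hlen]; omega)]
      have hdrop : (d0 :: d1 :: rest).drop 2 = rest := rfl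
      rw [hdrop, hwalk, hfindhead]
      cases hhead : (peaksA (d0 :: d1 :: rest)).head? with
      | some p =>
          obtain ⟨tl, htl⟩ : ∃ tl, peaksA (d0 :: d1 :: rest) = p :: tl := by
            cases hpk : peaksA (d0 :: d1 :: rest) with
            | nil => rw [hpk] at hhead; simp at hhead
            | cons a l =>
                rw [hpk] at hhead; simp only [List.head?_cons, Option.some.injEq] at hhead
                exact ⟨l, by rw [hhead]⟩
          have hpmem : p ∈ PySem.List.pyRange 1 (((d0 :: d1 :: rest).length : Int) - 1) 1 := by
            have hm : p ∈ peaksA (d0 :: d1 :: rest) := by rw [htl]; exact List.mem_cons_self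
            rw [peaksA_eq_filter] at hm
            exact List.mem_of_mem_filter hm
          have hpb : 1 ≤ p ∧ p < ((d0 :: d1 :: rest).length : Int) - 1 :=
            (PySem.List.mem_pyRange_one).1 hpmem
          rw [htl]
          simp only [List.length_cons, Option.map_some]
          rw [if_pos ⟨hd, Nat.succ_pos _⟩]
          have hp0 : PySem.List.pyGetD (p :: tl) 0 0 = p := by
            simp [PySem.List.pyGetD_zero_cons]
          rw [hp0, PySem.List.foldl_add, sum_filter_pos_eq_sum_max]
          have hcast : p = ((p.toNat : ℕ) : Int) := by omega
          have hple : p.toNat ≤ (d0 :: d1 :: rest).length := by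
            have h2 := hpb.2; rw [hlen] at h2; simp; omega
          rw [hcast, map_pyGetD_take (d0 :: d1 :: rest)
            (fun v => max (min (PySem.List.pyGetD (d0 :: d1 :: rest) ((p.toNat : ℕ) : Int) 0) d0 - v) 0)
            p.toNat hple]
          simp only [zero_add, List.map_map, Int.toNat_natCast, Function.comp_def]
      | none =>
          have hpknil : peaksA (d0 :: d1 :: rest) = [] := by
            cases hpk : peaksA (d0 :: d1 :: rest) with
            | nil => rfl
            | cons a l => rw [hpk] at hhead; simp at hhead
          rw [hpknil]
          simp only [List.length_nil, Option.map_none]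
          by_cases hlast : PySem.List.pyGetD (d0 :: d1 :: rest) (-1) 0
              > PySem.List.pyGetD (d0 :: d1 :: rest) (-2) 0
          · rw [if_neg (by simp), if_pos (show _ ∧ _ ∧ _ from ⟨hd, hlast, by simp⟩), if_pos hlast]
            rw [PySem.List.foldl_add, sum_filter_pos_eq_sum_max]
            have hcast : ((d0 :: d1 :: rest).length : Int)
                = (((d0 :: d1 :: rest).length : ℕ) : Int) := rfl
            rw [hcast, map_pyGetD_take (d0 :: d1 :: rest)
              (fun v => max (min d0 (PySem.List.pyGetD (d0 :: d1 :: rest) (-1) 0) - v) 0)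
              (d0 :: d1 :: rest).length (le_refl _)]
            simp only [zero_add, List.map_map, Function.comp_def, List.take_length]
          · rw [if_neg (by simp), if_neg (fun h => hlast h.2.1), if_neg hlast]
    · unfold calculate_start_water calculate_start_water_alt
      simp only []
      rw [hg0, hg1, if_pos hn1, if_neg (fun h => hd h.1), if_neg (fun h => hd h.1),
        if_pos (Or.inr (by omega))]

-- ===== VERDICT (by name: the statement is the Claim_ definition above) =====
theorem calculate_start_water_spec : Claim_equal_calculate_start_water := by
  intro data _
  exact calculate_start_water_eq data
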